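-- pv_equiv track=rewrite | github.com/lenarother/advent-of-code | adventofcode_2015/day_25/solution.py | solve
-- ===== SOURCE A (Python) =====
-- def code_generator():
--     previous_code = None
--     while 1:
--         if not previous_code:
--             yield 20151125
--             previous_code = 20151125
--         previous_code = (previous_code * 252533) % 33554393
--         yield previous_code
--
-- def position_generator():
--     x, y = 0, 0
--     while 1:
--         if y == 0:
--             x = 1
--             y = 1
--         elif y == 1:
--             y = x + 1
--             x = 1
--         else:
--             y -= 1
--             x += 1
--         yield x, y
--
-- def solve(row, column):
--     pg = position_generator()
--     cg = code_generator()
--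
--     while 1:
--         x, y = next(pg)
--         c = next(cg)
--         if x == column and y == row:
--             return c
-- ===== SOURCE B (Python) =====
-- def solve(row, column):
--     # position (column, row) is the n-th cell in diagonal order:
--     # n = T(row+column-2) + column; code = 20151125 * 252533^(n-1) mod 33554393
--     diag = row + column
--     n = (diag - 2) * (diag - 1) // 2 + column
--     return 20151125 * pow(252533, n - 1, 33554393) % 33554393
-- ===== Notes on version B (the rewrite author's own statement) =====
-- stated objective: faster
-- what changed: Replaces A's step-by-step walk along all diagonals with the closed-form triangular index n = (row+column-2)(row+column-1)/2 + column and one modular exponentiation pow(252533, n-1, 33554393).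
import Mathlib
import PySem

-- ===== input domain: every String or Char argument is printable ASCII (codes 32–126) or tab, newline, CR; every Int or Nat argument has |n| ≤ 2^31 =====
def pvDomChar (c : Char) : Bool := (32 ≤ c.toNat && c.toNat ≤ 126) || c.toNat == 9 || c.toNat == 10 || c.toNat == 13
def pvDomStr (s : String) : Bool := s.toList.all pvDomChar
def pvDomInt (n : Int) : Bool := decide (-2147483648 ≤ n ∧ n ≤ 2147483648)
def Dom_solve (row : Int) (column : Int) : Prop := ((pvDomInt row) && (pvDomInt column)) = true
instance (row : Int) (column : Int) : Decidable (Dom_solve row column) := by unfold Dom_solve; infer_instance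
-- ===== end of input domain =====

-- B replaces A's cell-by-cell diagonal walk by the closed-form triangular index plus one
-- modular exponentiation (objective: faster, asymptotically).

-- ===== PORT A =====
-- position_generator: one step of the diagonal walk (state = last yielded (x, y), initially (0, 0))
def pvStep (x y : Int) : Int × Int :=
  if y = 0 then (1, 1)
  else if y = 1 then (1, x + 1)
  else (x + 1, y - 1)

-- code_generator as a state machine: state = previous_code (none before the first yield);
-- returns (yielded value, new state)
def pvNextCode : Option Int → Int × Option Int
  | none => (20151125, some 20151125)
  | some p =>
    let c := PySem.Int.mod (p * 252533) 33554393
    (c, some c)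

-- the 'while 1' loop of solve; fuel only bounds the iteration count (under Pre_ it is never
-- exhausted, see pvLoop_eq below), it does not change the computation
def pvLoop (row column : Int) : Int → Int → Option Int → Nat → Int
  | _, _, _, 0 => 0
  | x, y, s, fuel + 1 =>
    let xy := pvStep x y
    let cs := pvNextCode s
    if xy.1 = column ∧ xy.2 = row then cs.1
    else pvLoop row column xy.1 xy.2 cs.2 fuel

def solve (row : Int) (column : Int) : Int :=
  pvLoop row column 0 0 none ((row + column).toNat ^ 2)

-- ===== PORT B =====
def solve_alt (row : Int) (column : Int) : Int :=
  let diag := row + column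
  let n := PySem.Int.floordiv ((diag - 2) * (diag - 1)) 2 + column
  PySem.Int.mod (20151125 * PySem.Int.powMod 252533 (n - 1).toNat 33554393) 33554393

-- ===== PRECONDITION & SPEC =====
-- Pre_ excludes row < 1 or column < 1: there A's 'while 1' never meets the position and loops forever.
def Pre_solve (row : Int) (column : Int) : Prop := 1 ≤ row ∧ 1 ≤ column
instance (row : Int) (column : Int) : Decidable (Pre_solve row column) := by
  unfold Pre_solve; infer_instance
def pvWitness_solve : Int × Int := (3, 4)

def Spec_solve (row : Int) (column : Int) (out : Int) : Prop := out = solve_alt row column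
instance (row : Int) (column : Int) (out : Int) : Decidable (Spec_solve row column out) := by unfold Spec_solve; infer_instance

-- ===== CLAIM (what is proved, stated in full; the proofs are below) =====
def Claim_equal_solve : Prop := ∀ (row : Int) (column : Int), Dom_solve row column → Pre_solve row column → Spec_solve row column (solve row column)

-- ===== LEMMAS AND PROOFS =====

-- the k-th code yielded by code_generator (0-indexed)
def codeAt (k : Nat) : Int := (20151125 * 252533 ^ k) % 33554393

lemma pymod_eq (a : Int) : PySem.Int.mod a 33554393 = a % 33554393 :=
  PySem.Int.mod_eq_emod_of_pos (by norm_num)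

lemma codeAt_succ (k : Nat) :
    PySem.Int.mod (codeAt k * 252533) 33554393 = codeAt (k + 1) := by
  rw [pymod_eq]
  unfold codeAt
  rw [Int.mul_emod, Int.emod_emod_of_dvd _ dvd_rfl, ← Int.mul_emod, pow_succ]
  ring_nf

-- the diagonal order is injective: a position determines its 1-based index
lemma pos_index_inj (x y c r i j : Int) (hx : 1 ≤ x) (hy : 1 ≤ y) (hc : 1 ≤ c) (hr : 1 ≤ r)
    (h1 : (x + y - 2) * (x + y - 1) = 2 * (i - x))
    (h2 : (c + r - 2) * (c + r - 1) = 2 * (j - c))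
    (hij : i = j) : x = c ∧ y = r := by
  subst hij
  rcases lt_trichotomy (x + y) (c + r) with hlt | heq | hgt
  · exfalso
    have hm : (x + y - 1) * (x + y) ≤ (c + r - 2) * (c + r - 1) :=
      mul_le_mul (by omega) (by omega) (by omega) (by omega)
    nlinarith [h1, h2, hm]
  · constructor
    · rw [heq] at h1; linarith [h1, h2]
    · have : x = c := by rw [heq] at h1; linarith [h1, h2]
      omega
  · exfalso
    have hm : (c + r - 1) * (c + r) ≤ (x + y - 2) * (x + y - 1) :=
      mul_le_mul (by omega) (by omega) (by omega) (by omega)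
    nlinarith [h1, h2, hm]

-- main loop invariant: entering with the k-th position/code (k ≥ 1), enough fuel left,
-- the loop returns the code at the target index n
lemma pvLoop_eq (row column : Int) (hr : 1 ≤ row) (hc : 1 ≤ column) (n : Int)
    (hn : (column + row - 2) * (column + row - 1) = 2 * (n - column)) :
    ∀ (fuel k : Nat) (x y : Int), 1 ≤ x → 1 ≤ y →
      (x + y - 2) * (x + y - 1) = 2 * ((k : Int) - x) →
      ¬(x = column ∧ y = row) → 1 ≤ k → (k : Int) ≤ n → n ≤ (k : Int) + (fuel : Int) →
      pvLoop row column x y (some (codeAt (k - 1))) fuel = codeAt ((n - 1).toNat) := by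
  intro fuel
  induction fuel with
  | zero =>
    intro k x y hx hy hinv hne hk1 hkn hfuel
    exfalso
    have hkn' : (k : Int) = n := by push_cast at hfuel ⊢; omega
    exact hne (pos_index_inj x y column row (k : Int) n hx hy hc hr hinv hn hkn')
  | succ f ih =>
    intro k x y hx hy hinv hne hk1 hkn hfuel
    -- k < n, since position k is not the target
    have hklt : (k : Int) < n := by
      rcases lt_or_eq_of_le hkn with h | h
      · exact h
      · exact absurd (pos_index_inj x y column row (k : Int) n hx hy hc hr hinv hn h) hne
    -- the yielded code is codeAt k
    have hcode : pvNextCode (some (codeAt (k - 1))) = (codeAt k, some (codeAt k)) := by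
      have : (k - 1) + 1 = k := by omega
      simp only [pvNextCode]
      rw [codeAt_succ, this]
    -- one step of the position generator
    have hy1 : y = 1 ∨ 2 ≤ y := by omega
    rcases hy1 with hy1 | hy2
    · -- next position (1, x + 1)
      subst hy1
      have hstep : pvStep x 1 = (1, x + 1) := by
        unfold pvStep
        rw [if_neg (by omega), if_pos rfl]
      have hinv' : ((1 : Int) + (x + 1) - 2) * (1 + (x + 1) - 1) = 2 * (((k : Int) + 1) - 1) := by
        nlinarith [hinv]
      simp only [pvLoop, hstep, hcode]
      by_cases hmatch : (1 : Int) = column ∧ x + 1 = row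
      · rw [if_pos hmatch]
        have hkn1 : (k : Int) + 1 = n := by
          obtain ⟨e1, e2⟩ := hmatch
          rw [← e1, ← e2] at hn
          linarith [hinv', hn]
        have : (n - 1).toNat = k := by omega
        rw [this]
      · rw [if_neg hmatch]
        have := ih (k + 1) 1 (x + 1) (by omega) (by omega)
          (by push_cast; linarith [hinv']) hmatch (by omega)
          (by push_cast; omega) (by push_cast; push_cast at hfuel; omega)
        simpa using this
    · -- next position (x + 1, y - 1)
      have hstep : pvStep x y = (x + 1, y - 1) := by
        unfold pvStep
        rw [if_neg (by omega), if_neg (by omega)]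
      have hinv' : ((x + 1) + (y - 1) - 2) * ((x + 1) + (y - 1) - 1) = 2 * (((k : Int) + 1) - (x + 1)) := by
        nlinarith [hinv]
      simp only [pvLoop, hstep, hcode]
      by_cases hmatch : x + 1 = column ∧ y - 1 = row
      · rw [if_pos hmatch]
        have hkn1 : (k : Int) + 1 = n := by
          obtain ⟨e1, e2⟩ := hmatch
          rw [← e1, ← e2] at hn
          linarith [hinv', hn]
        have : (n - 1).toNat = k := by omega
        rw [this]
      · rw [if_neg hmatch]
        have := ih (k + 1) (x + 1) (y - 1) (by omega) (by omega)
          (by push_cast; linarith [hinv']) hmatch (by omega)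
          (by push_cast; omega) (by push_cast; push_cast at hfuel; omega)
        simpa using this

-- ===== VERDICT (by name: the statement is the Claim_ definition above) =====
theorem solve_spec : Claim_equal_solve := by
  intro row column _hdom hpre
  obtain ⟨hr, hc⟩ := hpre
  -- the closed-form index n
  set P : Int := (row + column - 2) * (row + column - 1) with hP
  have heven : Even P := by
    have := Int.even_mul_succ_self (row + column - 2)
    have h2 : (row + column - 2) * (row + column - 2 + 1) = P := by ring
    rwa [h2] at this
  obtain ⟨t, ht⟩ := heven
  have ht2 : P = 2 * t := by omega
  have hfd : PySem.Int.floordiv P 2 = t := by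
    rw [ht2, PySem.Int.floordiv_eq_ediv_of_pos (by norm_num),
      Int.mul_ediv_cancel_left t (by norm_num)]
  set n : Int := t + column with hndef
  have hn : P = 2 * (n - column) := by rw [hndef]; ring_nf; linarith [ht2]
  have hP0 : 0 ≤ P := mul_nonneg (by omega) (by omega)
  have ht0 : 0 ≤ t := by linarith [ht2]
  have hn1 : 1 ≤ n := by omega
  -- B's value is codeAt ((n-1).toNat)
  have hB : solve_alt row column = codeAt ((n - 1).toNat) := by
    show PySem.Int.mod (20151125 *
        PySem.Int.powMod 252533 ((PySem.Int.floordiv ((row + column - 2) * (row + column - 1)) 2 + column) - 1).toNat 33554393) 33554393 = _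
    rw [← hP, hfd, ← hndef, pymod_eq]
    unfold PySem.Int.powMod codeAt
    rw [pymod_eq, Int.mul_emod, Int.emod_emod_of_dvd _ dvd_rfl, ← Int.mul_emod]
  -- A's value: unfold the first loop iteration
  unfold Spec_solve
  rw [hB]
  have hd2 : (2 : Int) ≤ row + column := by omega
  have hfuelpos : 1 ≤ (row + column).toNat ^ 2 := by
    have : 2 ≤ (row + column).toNat := by omega
    nlinarith
  obtain ⟨f, hf⟩ : ∃ f, (row + column).toNat ^ 2 = f + 1 :=
    ⟨(row + column).toNat ^ 2 - 1, by omega⟩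
  have hfbound : n ≤ 1 + (f : Int) := by
    -- n ≤ (row+column)^2 since 2n = P + 2·column and column ≤ row+column-1
    have hc2 : column ≤ row + column - 1 := by omega
    have hsq : ((row + column).toNat ^ 2 : Int) = (row + column) ^ 2 := by
      rw [Int.toNat_of_nonneg (by omega)]
    have hle : n ≤ (row + column) ^ 2 := by nlinarith [hn, hc2, hP0]
    have : ((f : Int) + 1) = (row + column) ^ 2 := by
      rw [← hsq]; exact_mod_cast congrArg (Nat.cast : Nat → Int) hf.symm
    omega
  show pvLoop row column 0 0 none ((row + column).toNat ^ 2) = codeAt ((n - 1).toNat)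
  rw [hf]
  have hstep0 : pvStep 0 0 = (1, 1) := by unfold pvStep; rw [if_pos rfl]
  simp only [pvLoop, hstep0, pvNextCode]
  by_cases hmatch : (1 : Int) = column ∧ (1 : Int) = row
  · rw [if_pos hmatch]
    obtain ⟨e1, e2⟩ := hmatch
    have hnv : n = 1 := by
      have : P = 0 := by rw [hP, ← e1, ← e2]; ring
      omega
    rw [hnv]
    norm_num [codeAt]
  · rw [if_neg hmatch]
    have h20 : (20151125 : Int) = codeAt 0 := by norm_num [codeAt]
    rw [h20]
    have := pvLoop_eq row column hr hc n (by linear_combination hn) f 1 1 1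
      (by norm_num) (by norm_num) (by norm_num) hmatch (by norm_num)
      (by push_cast; omega) (by push_cast at hfbound ⊢; omega)
    simpa using this
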